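-- pv_equiv track=rewrite | github.com/LNOI/pppp | src/recommendation/source/shop_source.py | post_shop_map_from_query_result
-- ===== SOURCE A (Python) =====
-- def post_shop_map_from_query_result(tup_list):
--     post_shop_map = {}
--     for pid, sid in tup_list:
--         shop_id = int(sid)
--         if shop_id not in post_shop_map:
--             post_shop_map[shop_id] = []
--         post_id = int(pid)
--         post_shop_map[shop_id].append(post_id)
--     return post_shop_map
-- ===== SOURCE B (Python) =====
-- def post_shop_map_from_query_result(tup_list):
--     shop_ids = dict.fromkeys(int(sid) for _pid, sid in tup_list)
--     return {sid: [int(pid) for pid, s in tup_list if int(s) == sid]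
--             for sid in shop_ids}
-- ===== Notes on version B (the rewrite author's own statement) =====
-- stated objective: alternative
-- what changed: Replaces the incremental if-key-missing dict aggregation with a two-phase grouping: first dedupe the shop ids in first-occurrence order (dict.fromkeys), then build the result with one comprehension that collects each shop's post ids by a per-key scan.
import Mathlib
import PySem

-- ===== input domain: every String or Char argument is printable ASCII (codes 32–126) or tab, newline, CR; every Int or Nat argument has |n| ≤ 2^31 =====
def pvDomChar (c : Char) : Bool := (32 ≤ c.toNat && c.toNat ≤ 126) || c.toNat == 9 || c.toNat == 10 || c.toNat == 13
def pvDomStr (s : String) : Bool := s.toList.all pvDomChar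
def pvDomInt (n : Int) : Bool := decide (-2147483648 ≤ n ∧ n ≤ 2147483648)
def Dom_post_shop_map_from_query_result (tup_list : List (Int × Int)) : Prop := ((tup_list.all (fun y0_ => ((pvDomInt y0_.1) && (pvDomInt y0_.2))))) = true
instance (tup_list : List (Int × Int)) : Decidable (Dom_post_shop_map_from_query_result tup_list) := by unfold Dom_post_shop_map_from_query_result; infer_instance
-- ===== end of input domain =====

-- B groups by a dedup-keys pass plus one per-key collecting scan instead of A's incremental dict aggregation (objective: alternative decomposition, same results).

-- ===== PORT A =====
-- loop body of A: ensure the key exists, then append the post id to its list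
def pvStepA (d : PySem.Dict Int (List Int)) (ps : Int × Int) : PySem.Dict Int (List Int) :=
  let d1 := if d.contains ps.2 then d else d.insert ps.2 ([] : List Int)
  d1.modify ps.2 [] (fun l => l ++ [ps.1])

def post_shop_map_from_query_result (tup_list : List (Int × Int)) : List (Int × List Int) :=
  (tup_list.foldl pvStepA PySem.Dict.empty).items

-- ===== PORT B =====
def post_shop_map_from_query_result_alt (tup_list : List (Int × Int)) : List (Int × List Int) :=
  (PySem.List.dedup (tup_list.map (fun ps => ps.2))).map
    (fun sid => (sid, (tup_list.filter (fun ps => ps.2 == sid)).map (fun ps => ps.1)))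

-- ===== PRECONDITION & SPEC =====
def Spec_post_shop_map_from_query_result (tup_list : List (Int × Int)) (out : List (Int × List Int)) : Prop := out = post_shop_map_from_query_result_alt tup_list
instance (tup_list : List (Int × Int)) (out : List (Int × List Int)) : Decidable (Spec_post_shop_map_from_query_result tup_list out) := by unfold Spec_post_shop_map_from_query_result; infer_instance

-- ===== CLAIM (what is proved, stated in full; the proofs are below) =====
def Claim_equal_post_shop_map_from_query_result : Prop := ∀ (tup_list : List (Int × Int)), Dom_post_shop_map_from_query_result tup_list → Spec_post_shop_map_from_query_result tup_list (post_shop_map_from_query_result tup_list)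

-- ===== LEMMAS AND PROOFS =====
theorem pv_getD_stepA (d : PySem.Dict Int (List Int)) (ps : Int × Int) (k : Int) :
    (pvStepA d ps).getD k [] = if k = ps.2 then d.getD ps.2 [] ++ [ps.1] else d.getD k [] := by
  unfold pvStepA
  by_cases h : d.contains ps.2
  · simp [h, PySem.Dict.getD_modify]
  · have h' : d.contains ps.2 = false := by simpa using h
    simp only [h', Bool.false_eq_true, if_false]
    rw [PySem.Dict.getD_modify]
    by_cases hk : k = ps.2
    · simp only [hk, PySem.Dict.getD_insert_self]
      rw [PySem.Dict.getD_of_not_contains]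
      exact h'
    · simp [hk, PySem.Dict.getD_insert]

theorem pv_keys_stepA (d : PySem.Dict Int (List Int)) (ps : Int × Int) :
    (pvStepA d ps).keys = PySem.Set.add d.keys ps.2 := by
  unfold pvStepA
  by_cases h : d.contains ps.2
  · have hm : ps.2 ∈ d.keys := (PySem.Dict.contains_iff_mem_keys d ps.2).mp h
    simp only [h, if_true, PySem.Dict.keys_modify, PySem.Set.add]
    rw [PySem.Dict.keys_insert_of_contains, if_pos (by simpa using hm)]
    exact h
  · have h' : d.contains ps.2 = false := by simpa using h
    have hm : ps.2 ∉ d.keys := fun hmem => h ((PySem.Dict.contains_iff_mem_keys d ps.2).mpr hmem)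
    simp only [h', Bool.false_eq_true, if_false, PySem.Dict.keys_modify,
      PySem.Dict.insert_insert_self, PySem.Set.add]
    rw [PySem.Dict.keys_insert_of_not_contains, if_neg (by simpa using hm)]
    exact h'

theorem pv_getD_foldA (l : List (Int × Int)) (d : PySem.Dict Int (List Int)) (k : Int) :
    (l.foldl pvStepA d).getD k [] = d.getD k [] ++ (l.filter (fun ps => ps.2 == k)).map (fun ps => ps.1) := by
  induction l generalizing d with
  | nil => simp
  | cons p t ih =>
    simp only [List.foldl_cons, ih, pv_getD_stepA, List.filter_cons]
    by_cases hk : p.2 = k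
    · simp [hk]
    · have : ¬ (k = p.2) := fun h => hk h.symm
      simp [hk, this]

theorem pv_keys_foldA (l : List (Int × Int)) (d : PySem.Dict Int (List Int)) :
    (l.foldl pvStepA d).keys = PySem.Set.update d.keys (l.map (fun ps => ps.2)) := by
  induction l generalizing d with
  | nil => simp [PySem.Set.update]
  | cons p t ih =>
    simp only [List.foldl_cons, List.map_cons, ih, pv_keys_stepA, PySem.Set.update]

-- ===== VERDICT (by name: the statement is the Claim_ definition above) =====
theorem post_shop_map_from_query_result_spec : Claim_equal_post_shop_map_from_query_result := by
  intro tup_list _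
  show post_shop_map_from_query_result tup_list = post_shop_map_from_query_result_alt tup_list
  unfold post_shop_map_from_query_result post_shop_map_from_query_result_alt
  have hkeys : (tup_list.foldl pvStepA PySem.Dict.empty).keys
      = PySem.Set.ofList (tup_list.map (fun ps => ps.2)) := by
    rw [pv_keys_foldA]
    simp [PySem.Set.update_nil_left]
  have hnd : (tup_list.foldl pvStepA PySem.Dict.empty).keys.Nodup := by
    rw [hkeys]; exact PySem.Set.nodup_ofList _
  rw [PySem.Dict.items_eq_map_keys _ hnd ([] : List Int), hkeys, PySem.List.dedup_eq_ofList]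
  refine List.map_congr_left (fun k hk => ?_)
  rw [pv_getD_foldA]
  simp
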